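-- pv_equiv track=rewrite | github.com/SlavaVasilakiy/seminars_python | lesson_5/examples_5/ex_5_2.py | range_nums
-- ===== SOURCE A (Python) =====
-- def range_nums (new_list: list):
--     my_list = []
--     for i in range(len(new_list)):
--         f = new_list[i]
--         list_1 = [f]
--         for k in range(i + 1, len(new_list)):
--             if new_list[k] > f:
--                 f = new_list[k]
--                 list_1.append(f)
--         if len(list_1) > 1:
--             my_list.append(list_1)
--     return my_list
-- ===== SOURCE B (Python) =====
-- def range_nums(new_list: list):
--     # two passes per start index: running-maximum array, then record extraction via zip
--     result = []
--     for i in range(len(new_list)):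
--         seq = []
--         m = new_list[i]
--         for x in new_list[i:]:
--             if x > m:
--                 m = x
--             seq.append(m)
--         chain = seq[:1]
--         for prev, cur in zip(seq, seq[1:]):
--             if cur > prev:
--                 chain.append(cur)
--         if len(chain) > 1:
--             result.append(chain)
--     return result
-- ===== Notes on version B (the rewrite author's own statement) =====
-- stated objective: alternative
-- what changed: A collects each chain in one inner loop that appends every new running maximum; B, per start index, first materialises the full running-maximum array of the suffix and then extracts the record values in a second pass over adjacent pairs (zip).
import Mathlib
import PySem

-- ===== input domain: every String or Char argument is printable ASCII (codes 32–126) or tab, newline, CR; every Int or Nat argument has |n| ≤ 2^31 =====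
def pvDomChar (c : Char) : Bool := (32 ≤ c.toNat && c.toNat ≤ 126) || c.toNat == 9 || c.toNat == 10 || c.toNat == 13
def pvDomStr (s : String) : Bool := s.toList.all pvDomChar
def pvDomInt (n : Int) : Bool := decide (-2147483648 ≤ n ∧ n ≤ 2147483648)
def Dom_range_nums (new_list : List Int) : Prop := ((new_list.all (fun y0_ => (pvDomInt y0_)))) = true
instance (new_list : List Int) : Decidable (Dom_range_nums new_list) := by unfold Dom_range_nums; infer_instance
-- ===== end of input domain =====

-- B replaces A's single record-collecting inner loop by two passes per start index
-- (a running-maximum array, then record extraction over adjacent pairs); alternative decomposition, same cost.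


-- ===== PORT A =====
def range_nums (new_list : List Int) : List (List Int) :=
  (PySem.List.pyRange 0 new_list.length 1).foldl (fun my_list i =>
    let f := PySem.List.pyGetD new_list i 0
    let st := (PySem.List.pyRange (i + 1) new_list.length 1).foldl
      (fun (st : Int × List Int) k =>
        if PySem.List.pyGetD new_list k 0 > st.1 then
          (PySem.List.pyGetD new_list k 0, st.2 ++ [PySem.List.pyGetD new_list k 0])
        else st) (f, [f])
    if st.2.length > 1 then my_list ++ [st.2] else my_list) []

-- ===== PORT B =====
def range_nums_alt (new_list : List Int) : List (List Int) :=
  (PySem.List.pyRange 0 new_list.length 1).foldl (fun result i =>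
    let st := (PySem.List.slice new_list (some i) none).foldl
      (fun (st : Int × List Int) x =>
        let m := if x > st.1 then x else st.1
        (m, st.2 ++ [m])) (PySem.List.pyGetD new_list i 0, [])
    let seq := st.2
    let chain := (seq.zip (PySem.List.slice seq (some 1) none)).foldl
      (fun ch pc => if pc.2 > pc.1 then ch ++ [pc.2] else ch)
      (PySem.List.slice seq none (some 1))
    if chain.length > 1 then result ++ [chain] else result) []

-- ===== PRECONDITION & SPEC =====
def Spec_range_nums (new_list : List Int) (out : List (List Int)) : Prop := out = range_nums_alt new_list
instance (new_list : List Int) (out : List (List Int)) : Decidable (Spec_range_nums new_list out) := by unfold Spec_range_nums; infer_instance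

-- ===== CLAIM (what is proved, stated in full; the proofs are below) =====
def Claim_equal_range_nums : Prop := ∀ (new_list : List Int), Dom_range_nums new_list → Spec_range_nums new_list (range_nums new_list)

-- ===== LEMMAS AND PROOFS =====

/-- A's inner loop, structurally: records strictly above the running max `f`. -/
def recsA (f : Int) : List Int → List Int
  | [] => []
  | x :: xs => if x > f then x :: recsA x xs else recsA f xs

/-- B's first pass, structurally: running maxima. -/
def runmax (m : Int) : List Int → List Int
  | [] => []
  | x :: xs => let m' := if x > m then x else m; m' :: runmax m' xs

theorem foldlA_eq_recsA (xs : List Int) (f : Int) (l : List Int) :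
    (xs.foldl (fun (st : Int × List Int) x =>
        if x > st.1 then (x, st.2 ++ [x]) else st) (f, l)) =
      ((f :: recsA f xs).getLast (by simp), l ++ recsA f xs) := by
  induction xs generalizing f l with
  | nil => simp [recsA]
  | cons x xs ih =>
    simp only [List.foldl_cons, recsA]
    by_cases h : x > f
    · simp only [h, if_pos, ih x (l ++ [x])]
      simp [List.getLast_cons]
    · simp [h, ih f l]

theorem foldlB_eq_runmax (xs : List Int) (m : Int) (s : List Int) :
    (xs.foldl (fun (st : Int × List Int) x =>
        (if x > st.1 then x else st.1, st.2 ++ [if x > st.1 then x else st.1])) (m, s)) =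
      ((m :: runmax m xs).getLast (by simp), s ++ runmax m xs) := by
  induction xs generalizing m s with
  | nil => simp [runmax]
  | cons x xs ih =>
    simp only [List.foldl_cons, runmax]
    rw [ih]
    simp [List.getLast_cons]

/-- B's second pass, structurally: records over adjacent pairs. -/
def recsAdj (a : Int) : List Int → List Int
  | [] => []
  | x :: xs => if x > a then x :: recsAdj x xs else recsAdj x xs

theorem foldl_zip_recsAdj (rest : List Int) (a : Int) (ch : List Int) :
    (((a :: rest).zip rest).foldl
        (fun ch (pc : Int × Int) => if pc.2 > pc.1 then ch ++ [pc.2] else ch) ch) =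
      ch ++ recsAdj a rest := by
  induction rest generalizing a ch with
  | nil => simp [recsAdj]
  | cons x xs ih =>
    simp only [List.zip_cons_cons, List.foldl_cons, recsAdj]
    by_cases h : x > a
    · simp [h, ih x (ch ++ [x])]
    · simp [h, ih x ch]

theorem recsAdj_runmax (xs : List Int) (a : Int) : recsAdj a (runmax a xs) = recsA a xs := by
  induction xs generalizing a with
  | nil => rfl
  | cons x xs ih =>
    simp only [runmax, recsA, recsAdj]
    by_cases h : x > a
    · simp [h, ih]
    · simp [h, ih]

theorem range_nums_spec : Claim_equal_range_nums := by
  intro new_list _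
  unfold Spec_range_nums range_nums range_nums_alt
  refine PySem.List.foldl_congr_mem _ _ _ _ ?_
  intro acc i hi
  dsimp only
  rw [PySem.List.mem_pyRange_one] at hi
  obtain ⟨h0, hn⟩ := hi
  -- the suffix new_list[i:] is f :: xs with f = new_list[i]
  have hlt : i.toNat < new_list.length := by omega
  have hsuf : PySem.List.slice new_list (some i) none = new_list.drop i.toNat :=
    PySem.List.slice_from new_list h0
  have hdrop : new_list.drop i.toNat =
      new_list[i.toNat] :: new_list.drop (i.toNat + 1) := by
    rw [List.drop_eq_getElem_cons hlt]
  have hf : PySem.List.pyGetD new_list i 0 = new_list[i.toNat] :=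
    PySem.List.pyGetD_eq_getElem new_list 0 h0 (by exact_mod_cast hn)
  set f := new_list[i.toNat] with hfdef
  set xs := new_list.drop (i.toNat + 1) with hxs
  -- A's inner loop
  have hA : (PySem.List.pyRange (i + 1) new_list.length 1).foldl
      (fun (st : Int × List Int) k =>
        if PySem.List.pyGetD new_list k 0 > st.1 then
          (PySem.List.pyGetD new_list k 0, st.2 ++ [PySem.List.pyGetD new_list k 0])
        else st) (PySem.List.pyGetD new_list i 0, [PySem.List.pyGetD new_list i 0]) =
      ((f :: recsA f xs).getLast (by simp), [f] ++ recsA f xs) := by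
    have hstep := PySem.List.foldl_pyRange_pyGetD' new_list 0
      (fun (st : Int × List Int) v => if v > st.1 then (v, st.2 ++ [v]) else st)
      (PySem.List.pyGetD new_list i 0, [PySem.List.pyGetD new_list i 0]) (a := i + 1) (by omega)
    rw [hstep, hf]
    have : (i + 1).toNat = i.toNat + 1 := by omega
    rw [this, ← hxs, foldlA_eq_recsA]
  rw [hA]
  -- B's body
  rw [hsuf, hdrop, hf]
  have hB := foldlB_eq_runmax (f :: xs) f []
  simp only [List.nil_append] at hB
  rw [hB]
  have hrm : runmax f (f :: xs) = f :: runmax f xs := by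
    simp [runmax]
  rw [hrm]
  rw [show PySem.List.slice (f :: runmax f xs) (some 1) none = runmax f xs from by
        rw [PySem.List.slice_from_one]; rfl,
      show PySem.List.slice (f :: runmax f xs) none (some 1) = [f] from by
        rw [PySem.List.slice_to _ (by norm_num)]; rfl]
  rw [foldl_zip_recsAdj, recsAdj_runmax]
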